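-- pv_equiv track=rewrite | github.com/HKUDS/nanobot | nanobot/agent/tools/smriti_lite.py | _infer_kind
-- ===== SOURCE A (Python) =====
-- from typing import Iterable, Optional
--
-- def _infer_kind(kind: Optional[str], text: str) -> str:
--     k = (kind or "").strip().lower()
--     if k in ("fact", "pref", "decision", "todo", "note"):
--         return k
--     t = (text or "").lstrip().lower()
--     for prefix, kk in (
--         ("fact:", "fact"),
--         ("pref:", "pref"),
--         ("decision:", "decision"),
--         ("todo:", "todo"),
--         ("note:", "note"),
--     ):
--         if t.startswith(prefix):
--             return kk
--     return "note"
-- ===== SOURCE B (Python) =====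
-- _VALID = {"fact", "pref", "decision", "todo", "note"}
--
-- def _infer_kind(kind, text):
--     k = (kind or "").strip().lower()
--     if k in _VALID:
--         return k
--     head, sep, _ = (text or "").lstrip().lower().partition(":")
--     return head if sep and head in _VALID else "note"
-- ===== Notes on version B (the rewrite author's own statement) =====
-- stated objective: simpler
-- what changed: Replaces the five-iteration prefix/startswith loop with a single partition at the first ':' and one set membership test on the head token.
import Mathlib
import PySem

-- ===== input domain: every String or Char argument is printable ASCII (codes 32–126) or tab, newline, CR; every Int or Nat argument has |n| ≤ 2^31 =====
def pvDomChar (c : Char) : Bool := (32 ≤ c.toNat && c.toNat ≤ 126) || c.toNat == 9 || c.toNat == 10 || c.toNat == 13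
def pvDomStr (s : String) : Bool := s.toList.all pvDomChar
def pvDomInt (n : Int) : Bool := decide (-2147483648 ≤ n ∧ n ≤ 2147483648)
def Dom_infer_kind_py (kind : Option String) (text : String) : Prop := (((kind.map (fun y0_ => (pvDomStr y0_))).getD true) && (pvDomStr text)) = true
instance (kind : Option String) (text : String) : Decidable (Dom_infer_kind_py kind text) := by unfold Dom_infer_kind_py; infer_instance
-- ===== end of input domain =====

-- B replaces A's five startswith checks with one partition at the first ':' plus a set lookup (objective: simpler).

-- ===== PORT A =====
def infer_kind_py (kind : Option String) (text : String) : String :=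
  let k := PySem.Str.lower (PySem.Str.strip (kind.getD ""))
  if k = "fact" ∨ k = "pref" ∨ k = "decision" ∨ k = "todo" ∨ k = "note" then k
  else
    let t := PySem.Str.lower (PySem.Str.lstrip text)
    if PySem.Str.startswith t "fact:" then "fact"
    else if PySem.Str.startswith t "pref:" then "pref"
    else if PySem.Str.startswith t "decision:" then "decision"
    else if PySem.Str.startswith t "todo:" then "todo"
    else if PySem.Str.startswith t "note:" then "note"
    else "note"

-- ===== PORT B =====
def infer_kind_py_alt (kind : Option String) (text : String) : String :=
  let valid : List String := ["fact", "pref", "decision", "todo", "note"]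
  let k := PySem.Str.lower (PySem.Str.strip (kind.getD ""))
  if k ∈ valid then k
  else
    let t := PySem.Str.lower (PySem.Str.lstrip text)
    -- t.partition(":") ported by hand (exact): head = chars before the first ':', sep nonempty iff ':' occurs
    let head := String.ofList (t.toList.takeWhile (fun c => c ≠ ':'))
    if t.toList.contains ':' ∧ head ∈ valid then head else "note"

-- ===== PRECONDITION & SPEC =====
def Spec_infer_kind_py (kind : Option String) (text : String) (out : String) : Prop := out = infer_kind_py_alt kind text
instance (kind : Option String) (text : String) (out : String) : Decidable (Spec_infer_kind_py kind text out) := by unfold Spec_infer_kind_py; infer_instance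

-- ===== CLAIM (what is proved, stated in full; the proofs are below) =====
def Claim_equal_infer_kind_py : Prop := ∀ (kind : Option String) (text : String), Dom_infer_kind_py kind text → Spec_infer_kind_py kind text (infer_kind_py kind text)

-- ===== LEMMAS AND PROOFS =====

-- w ++ [':'] is a prefix of t  ↔  t's segment before the first ':' is exactly w (and ':' occurs), for w without ':'
theorem prefix_colon_iff (t w : List Char) (hw : ':' ∉ w) :
    (w ++ [':'] <+: t) ↔ (t.takeWhile (fun c => c ≠ ':') = w ∧ ':' ∈ t) := by
  induction t generalizing w with
  | nil => simp
  | cons c t' ih =>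
    cases w with
    | nil =>
      by_cases hc : c = ':'
      · subst hc; simp [List.takeWhile_cons]
      · simp only [List.nil_append, List.cons_prefix_cons, List.takeWhile_cons, List.mem_cons]
        simp [hc, Ne.symm hc]
    | cons a w' =>
      have ha : a ≠ ':' := fun h => hw (h ▸ List.mem_cons_self)
      have hw' : ':' ∉ w' := fun h => hw (List.mem_cons_of_mem _ h)
      simp only [List.cons_append, List.cons_prefix_cons]
      by_cases hc : c = ':'
      · subst hc
        constructor
        · rintro ⟨h, -⟩; exact absurd h ha
        · rintro ⟨h, -⟩; simp at h
      · rw [List.takeWhile_cons]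
        simp only [decide_eq_true_eq] at *
        rw [if_pos (by simpa using hc)]
        constructor
        · rintro ⟨rfl, h⟩
          have := (ih w' hw').mp h
          refine ⟨?_, List.mem_cons_of_mem _ this.2⟩
          simpa using this.1
        · rintro ⟨h1, h2⟩
          rw [List.cons_eq_cons] at h1
          refine ⟨h1.1.symm, (ih w' hw').mpr ⟨h1.2, ?_⟩⟩
          rcases List.mem_cons.mp h2 with h | h
          · exact absurd h.symm hc
          · exact h

theorem pred_colon : (fun c : Char => !decide (c = ':')) = (fun c => decide (c ≠ ':')) := by
  funext c; simp

theorem startswith_colon_eq (t p : String) (w : List Char) (hp : p.toList = w ++ [':'])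
    (hw : ':' ∉ w) :
    PySem.Str.startswith t p =
      (decide (t.toList.takeWhile (fun c => c ≠ ':') = w) && t.toList.contains ':') := by
  have hb : PySem.Str.startswith t p = PySem.Chars.startswith t.toList p.toList := by
    simp
  rw [hb, hp]
  by_cases hpre : (w ++ [':']) <+: t.toList
  · rw [(PySem.Chars.startswith_iff _ _).mpr hpre]
    obtain ⟨h1, h2⟩ := (prefix_colon_iff _ _ hw).mp hpre
    simp only [decide_not, Bool.true_eq, Bool.and_eq_true, decide_eq_true_eq,
      List.contains_iff_mem]
    rw [pred_colon]
    exact ⟨h1, h2⟩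
  · have hs : PySem.Chars.startswith t.toList (w ++ [':']) = false := by
      rw [Bool.eq_false_iff]
      intro h
      exact hpre ((PySem.Chars.startswith_iff _ _).mp h)
    rw [hs]
    rw [prefix_colon_iff _ _ hw] at hpre
    by_cases hA : t.toList.takeWhile (fun c => c ≠ ':') = w
    · have hnc : ':' ∉ t.toList := fun h => hpre ⟨hA, h⟩
      simp [List.contains_iff_mem, hnc]
    · simp only [decide_not, Bool.false_eq, Bool.and_eq_false_iff, decide_eq_false_iff_not]
      left
      rw [pred_colon]
      simpa using hA

theorem ofList_eq_iff (tw : List Char) (s : String) : String.ofList tw = s ↔ tw = s.toList := by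
  constructor
  · intro h; rw [← h]; simp
  · intro h; rw [h]; simp

-- ===== VERDICT (by name: the statement is the Claim_ definition above) =====
theorem infer_kind_py_spec : Claim_equal_infer_kind_py := by
  intro kind text _
  unfold Spec_infer_kind_py infer_kind_py infer_kind_py_alt
  simp only [List.mem_cons, List.not_mem_nil, or_false]
  by_cases hk : PySem.Str.lower (PySem.Str.strip (kind.getD "")) = "fact" ∨
      PySem.Str.lower (PySem.Str.strip (kind.getD "")) = "pref" ∨
      PySem.Str.lower (PySem.Str.strip (kind.getD "")) = "decision" ∨
      PySem.Str.lower (PySem.Str.strip (kind.getD "")) = "todo" ∨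
      PySem.Str.lower (PySem.Str.strip (kind.getD "")) = "note"
  · rw [if_pos hk, if_pos hk]
  · rw [if_neg hk, if_neg hk]
    set t := PySem.Str.lower (PySem.Str.lstrip text) with ht
    have h1 := startswith_colon_eq t "fact:" "fact".toList (by decide) (by decide)
    have h2 := startswith_colon_eq t "pref:" "pref".toList (by decide) (by decide)
    have h3 := startswith_colon_eq t "decision:" "decision".toList (by decide) (by decide)
    have h4 := startswith_colon_eq t "todo:" "todo".toList (by decide) (by decide)
    have h5 := startswith_colon_eq t "note:" "note".toList (by decide) (by decide)
    rw [h1, h2, h3, h4, h5]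
    set tw := t.toList.takeWhile (fun c => c ≠ ':') with htw
    by_cases hcl : t.toList.contains ':' = true
    · simp only [hcl, Bool.and_true, decide_eq_true_eq]
      have hm : ':' ∈ t.toList := List.contains_iff_mem.mp hcl
      by_cases e1 : tw = ['f', 'a', 'c', 't']
      · simp [ofList_eq_iff, e1, hm]
      · by_cases e2 : tw = ['p', 'r', 'e', 'f']
        · simp [ofList_eq_iff, e1, e2, hm]
        · by_cases e3 : tw = ['d', 'e', 'c', 'i', 's', 'i', 'o', 'n']
          · simp [ofList_eq_iff, e1, e2, e3, hm]
          · by_cases e4 : tw = ['t', 'o', 'd', 'o']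
            · simp [ofList_eq_iff, e1, e2, e3, e4, hm]
            · by_cases e5 : tw = ['n', 'o', 't', 'e']
              · simp [ofList_eq_iff, e1, e2, e3, e4, e5, hm]
              · simp [ofList_eq_iff, e1, e2, e3, e4, e5, hm]
    · have hm : ':' ∉ t.toList := by
        intro h; exact hcl (List.contains_iff_mem.mpr h)
      simp [hcl, hm]
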